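-- pv_equiv track=rewrite | github.com/damienmarsic/barseqcount | barseqcount/barseqcount.py | maxmatch
-- ===== SOURCE A (Python) =====
-- def maxmatch(sample,target,probe):
--     a=b=x=y=w=z=0
--     for i in range(probe,len(sample)):
--         if sample[-i:] in target:
--             a=i
--         else:
--             w=1
--         if sample[:i] in target:
--             b=i
--         else:
--             z=1
--         if w and z:
--             break
--     if a:
--         x=target.find(sample[-a:])
--     if b:
--         y=target.find(sample[:b])
--     return a,x,b,y
-- ===== SOURCE B (Python) =====
-- def maxmatch(sample, target, probe):
--     # Binary search on length: "suffix/prefix of length i is a substring of target"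
--     # is monotone (downward closed) in i for i >= 1, so the largest matching
--     # length in [probe, len(sample)-1] is found in O(log n) membership tests.
--     n = len(sample)
--
--     def best(ok):
--         lo, hi = probe, n - 1
--         if lo > hi or not ok(lo):
--             return 0
--         while lo < hi:
--             mid = (lo + hi + 1) // 2
--             if ok(mid):
--                 lo = mid
--             else:
--                 hi = mid - 1
--         return lo
--
--     a = best(lambda i: sample[n - i:] in target)
--     x = target.find(sample[n - a:]) if a else 0
--     b = best(lambda i: sample[:i] in target)
--     y = target.find(sample[:b]) if b else 0
--     return a, x, b, y
-- ===== Notes on version B (the rewrite author's own statement) =====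
-- stated objective: faster
-- what changed: Replaces A's linear scan with break flags by a binary search on the match length, exploiting that 'suffix/prefix of length i is a substring of target' is downward closed in i for i >= 1.
-- outside the precondition, e.g. on maxmatch('xyz', 'cyz', 0): A returns (1, 2, 0, 0), B returns (2, 1, 0, 0); on maxmatch('aababb', 'abbbbaba', -1): A returns (0, 0, 0, 0), B returns (3, 0, 0, 0)
import Mathlib
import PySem

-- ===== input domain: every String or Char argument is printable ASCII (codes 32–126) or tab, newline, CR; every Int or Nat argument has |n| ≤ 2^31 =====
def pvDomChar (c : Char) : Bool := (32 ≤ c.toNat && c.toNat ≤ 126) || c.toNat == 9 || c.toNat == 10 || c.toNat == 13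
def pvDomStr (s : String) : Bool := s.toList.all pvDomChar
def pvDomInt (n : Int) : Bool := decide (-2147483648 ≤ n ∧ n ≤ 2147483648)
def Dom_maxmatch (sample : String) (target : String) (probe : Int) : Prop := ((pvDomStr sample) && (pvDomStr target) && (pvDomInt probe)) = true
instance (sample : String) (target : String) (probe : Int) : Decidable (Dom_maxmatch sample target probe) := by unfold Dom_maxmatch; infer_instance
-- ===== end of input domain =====

-- B replaces A's linear scan (with break flags) by a binary search on the match
-- length, using that substring-membership of a length-i suffix/prefix is
-- downward closed in i for i ≥ 1; equivalence is proved for probe ≥ 1.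

-- ===== PORT A =====
def maxmatchLoop (ls lt : List Char) : List Int → Int × Int × Int × Int → Int × Int × Int × Int
  | [], st => st
  | i :: rest, (a, b, w, z) =>
    let aw : Int × Int :=
      if PySem.Chars.isIn (PySem.List.slice ls (some (-i)) none) lt then (i, w) else (a, 1)
    let bz : Int × Int :=
      if PySem.Chars.isIn (PySem.List.slice ls none (some i)) lt then (i, z) else (b, 1)
    if aw.2 ≠ 0 ∧ bz.2 ≠ 0 then (aw.1, bz.1, aw.2, bz.2)
    else maxmatchLoop ls lt rest (aw.1, bz.1, aw.2, bz.2)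

def maxmatch (sample : String) (target : String) (probe : Int) : List Int :=
  let ls := sample.toList
  let lt := target.toList
  let st := maxmatchLoop ls lt (PySem.List.pyRange probe (PySem.List.len ls) 1) (0, 0, 0, 0)
  let a := st.1
  let b := st.2.1
  let x := if a ≠ 0 then PySem.Chars.find lt (PySem.List.slice ls (some (-a)) none) else 0
  let y := if b ≠ 0 then PySem.Chars.find lt (PySem.List.slice ls none (some b)) else 0
  [a, x, b, y]

-- ===== PORT B =====
-- midpoint bracket needed by bsearchMax's termination proof
theorem pvMidBounds (lo hi : Int) (h : lo < hi) :
    lo + 1 ≤ PySem.Int.floordiv (lo + hi + 1) 2 ∧ PySem.Int.floordiv (lo + hi + 1) 2 ≤ hi := by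
  rw [PySem.Int.floordiv_eq_ediv_of_pos (by omega)]
  omega

def bsearchMax (ok : Int → Bool) (lo hi : Int) : Int :=
  if h : lo < hi then
    let mid := PySem.Int.floordiv (lo + hi + 1) 2
    if ok mid then bsearchMax ok mid hi else bsearchMax ok lo (mid - 1)
  else lo
termination_by (hi - lo).toNat
decreasing_by
  · have := pvMidBounds lo hi h; omega
  · have := pvMidBounds lo hi h; omega

def bestMax (ok : Int → Bool) (lo hi : Int) : Int :=
  if lo > hi ∨ ok lo = false then 0 else bsearchMax ok lo hi

def maxmatch_alt (sample : String) (target : String) (probe : Int) : List Int :=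
  let ls := sample.toList
  let lt := target.toList
  let n := PySem.List.len ls
  let a := bestMax (fun i => PySem.Chars.isIn (PySem.List.slice ls (some (n - i)) none) lt) probe (n - 1)
  let x := if a ≠ 0 then PySem.Chars.find lt (PySem.List.slice ls (some (n - a)) none) else 0
  let b := bestMax (fun i => PySem.Chars.isIn (PySem.List.slice ls none (some i)) lt) probe (n - 1)
  let y := if b ≠ 0 then PySem.Chars.find lt (PySem.List.slice ls none (some b)) else 0
  [a, x, b, y]

-- ===== PRECONDITION & SPEC =====
-- Pre_ excludes probe ≤ 0, on which A still returns: there Python's negative-index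
-- slice wraparound and the whole-string test at i = 0 make A's loop (and its early
-- break) an accident of slice semantics rather than a prefix/suffix search.
def Pre_maxmatch (sample : String) (target : String) (probe : Int) : Prop := 1 ≤ probe
instance (sample : String) (target : String) (probe : Int) : Decidable (Pre_maxmatch sample target probe) := by unfold Pre_maxmatch; infer_instance

def pvWitness_maxmatch : String × String × Int := ("abcab", "xbca", 1)

def Spec_maxmatch (sample : String) (target : String) (probe : Int) (out : List Int) : Prop := out = maxmatch_alt sample target probe
instance (sample : String) (target : String) (probe : Int) (out : List Int) : Decidable (Spec_maxmatch sample target probe out) := by unfold Spec_maxmatch; infer_instance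

-- ===== CLAIM (what is proved, stated in full; the proofs are below) =====
def Claim_equal_maxmatch : Prop := ∀ (sample : String) (target : String) (probe : Int), Dom_maxmatch sample target probe → Pre_maxmatch sample target probe → Spec_maxmatch sample target probe (maxmatch sample target probe)

-- ===== LEMMAS AND PROOFS =====

-- the common specification: v is the greatest i in [lo, hi] with P i, and 0 when
-- there is none (for a P that is downward closed on [lo, hi])
def SpecMax (P : Int → Bool) (lo hi v : Int) : Prop :=
  if lo > hi ∨ P lo = false then v = 0
  else lo ≤ v ∧ v ≤ hi ∧ P v = true ∧ (v = hi ∨ P (v + 1) = false)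

def MonoOn (P : Int → Bool) (lo hi : Int) : Prop :=
  ∀ i j : Int, lo ≤ i → i ≤ j → j ≤ hi → P j = true → P i = true

theorem specMax_unique (P : Int → Bool) (lo hi v1 v2 : Int) (hm : MonoOn P lo hi)
    (h1 : SpecMax P lo hi v1) (h2 : SpecMax P lo hi v2) : v1 = v2 := by
  unfold SpecMax at h1 h2
  split_ifs at h1 h2 with h
  · omega
  · obtain ⟨l1, u1, p1, q1⟩ := h1
    obtain ⟨l2, u2, p2, q2⟩ := h2
    rcases lt_trichotomy v1 v2 with hlt | heq | hlt
    · rcases q1 with rfl | q1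
      · omega
      · have := hm (v1 + 1) v2 (by omega) (by omega) u2 p2
        rw [this] at q1; cases q1
    · exact heq
    · rcases q2 with rfl | q2
      · omega
      · have := hm (v2 + 1) v1 (by omega) (by omega) u1 p1
        rw [this] at q2; cases q2

theorem monoOn_congr (P Q : Int → Bool) (lo hi : Int)
    (hpq : ∀ i, lo ≤ i → i ≤ hi → P i = Q i) (hm : MonoOn P lo hi) : MonoOn Q lo hi := by
  intro i j hi1 hij hj2 hq
  rw [← hpq i hi1 (by omega), ← hpq j (by omega) hj2] at *
  exact hm i j hi1 hij hj2 hq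

theorem specMax_congr (P Q : Int → Bool) (lo hi v : Int)
    (hpq : ∀ i, lo ≤ i → i ≤ hi → P i = Q i) (h : SpecMax P lo hi v) : SpecMax Q lo hi v := by
  unfold SpecMax at h ⊢
  by_cases hlh : lo > hi
  · simp only [hlh, true_or, if_true] at h ⊢; exact h
  · rw [hpq lo (by omega) (by omega)] at h
    split_ifs at h ⊢ with hc
    · exact h
    · obtain ⟨l1, u1, p1, q1⟩ := h
      refine ⟨l1, u1, by rw [← hpq v l1 u1]; exact p1, ?_⟩
      rcases q1 with rfl | q1
      · exact Or.inl rfl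
      · by_cases hv : v = hi
        · exact Or.inl hv
        · exact Or.inr (by rw [← hpq (v + 1) (by omega) (by omega)]; exact q1)

theorem bsearchMax_spec (P : Int → Bool) (lo hi : Int) (hle : lo ≤ hi) (hlo : P lo = true)
    (hm : MonoOn P lo hi) :
    lo ≤ bsearchMax P lo hi ∧ bsearchMax P lo hi ≤ hi ∧ P (bsearchMax P lo hi) = true ∧
      (bsearchMax P lo hi = hi ∨ P (bsearchMax P lo hi + 1) = false) := by
  by_cases h : lo < hi
  · have hmid := pvMidBounds lo hi h
    rw [show bsearchMax P lo hi =
        (if P (PySem.Int.floordiv (lo + hi + 1) 2) then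
          bsearchMax P (PySem.Int.floordiv (lo + hi + 1) 2) hi
        else bsearchMax P lo (PySem.Int.floordiv (lo + hi + 1) 2 - 1)) by
      rw [bsearchMax]; simp [h]]
    set mid := PySem.Int.floordiv (lo + hi + 1) 2 with hmiddef
    by_cases hok : P mid = true
    · rw [if_pos hok]
      have ih := bsearchMax_spec P mid hi (by omega) hok
        (fun i j h1 h2 h3 hp => hm i j (by omega) h2 h3 hp)
      exact ⟨by omega, ih.2.1, ih.2.2.1, ih.2.2.2⟩
    · rw [if_neg (by simp [hok])]
      have ih := bsearchMax_spec P lo (mid - 1) (by omega) hlo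
        (fun i j h1 h2 h3 hp => hm i j h1 h2 (by omega) hp)
      refine ⟨ih.1, by omega, ih.2.2.1, ?_⟩
      rcases ih.2.2.2 with he | he
      · exact Or.inr (by rw [he]; simp only [sub_add_cancel]; simpa using hok)
      · exact Or.inr he
  · rw [show bsearchMax P lo hi = lo by rw [bsearchMax]; simp [h]]
    exact ⟨le_refl lo, hle, hlo, Or.inl (by omega)⟩
termination_by (hi - lo).toNat
decreasing_by
  · have := pvMidBounds lo hi h; omega
  · have := pvMidBounds lo hi h; omega

theorem bestMax_spec (P : Int → Bool) (lo hi : Int) (hm : MonoOn P lo hi) :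
    SpecMax P lo hi (bestMax P lo hi) := by
  unfold bestMax SpecMax
  split_ifs with h
  · rfl
  · push Not at h
    exact bsearchMax_spec P lo hi (by omega) (by simpa using h.2) hm

-- slices as drop/take
theorem slice_neg_eq_drop (ls : List Char) (i : Int) (h1 : 1 ≤ i) :
    PySem.List.slice ls (some (-i)) none = ls.drop (ls.length - i.toNat) := by
  have hk : i = ((i.toNat : Nat) : Int) := by omega
  rw [hk, PySem.List.slice_from_neg_natCast ls i.toNat (by omega)]
  congr 1

theorem slice_sub_eq_neg (ls : List Char) (i : Int) (h1 : 1 ≤ i) (h2 : i ≤ (ls.length : Int)) :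
    PySem.List.slice ls (some ((ls.length : Int) - i)) none = PySem.List.slice ls (some (-i)) none := by
  rw [slice_neg_eq_drop ls i h1]
  have hk : (ls.length : Int) - i = ((ls.length - i.toNat : Nat) : Int) := by omega
  rw [hk, PySem.List.slice_from_natCast]

theorem slice_to_eq_take (ls : List Char) (i : Int) (h1 : 0 ≤ i) :
    PySem.List.slice ls none (some i) = ls.take i.toNat := by
  exact PySem.List.slice_to ls h1

-- monotonicity (downward-closedness) of the two membership predicates
theorem monoS (ls lt : List Char) (i j : Int) (h1 : 1 ≤ i) (hij : i ≤ j)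
    (hj : PySem.Chars.isIn (PySem.List.slice ls (some (-j)) none) lt = true) :
    PySem.Chars.isIn (PySem.List.slice ls (some (-i)) none) lt = true := by
  rw [slice_neg_eq_drop ls j (by omega)] at hj
  rw [slice_neg_eq_drop ls i h1]
  rw [PySem.Chars.isIn_iff_infix] at hj ⊢
  have hdp : ls.drop (ls.length - i.toNat) =
      (ls.drop (ls.length - j.toNat)).drop ((ls.length - i.toNat) - (ls.length - j.toNat)) := by
    rw [List.drop_drop]; congr 1; omega
  rw [hdp]
  exact ((List.drop_suffix _ _).isInfix).trans hj

theorem monoP (ls lt : List Char) (i j : Int) (h1 : 0 ≤ i) (hij : i ≤ j)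
    (hj : PySem.Chars.isIn (PySem.List.slice ls none (some j)) lt = true) :
    PySem.Chars.isIn (PySem.List.slice ls none (some i)) lt = true := by
  rw [slice_to_eq_take ls j (by omega)] at hj
  rw [slice_to_eq_take ls i h1]
  rw [PySem.Chars.isIn_iff_infix] at hj ⊢
  have htk : ls.take i.toNat = (ls.take j.toNat).take i.toNat := by
    rw [List.take_take]; congr 1; omega
  rw [htk]
  exact ((List.take_prefix _ _).isInfix).trans hj

-- the loop invariant proof
def PredS (ls lt : List Char) (i : Int) : Bool :=
  PySem.Chars.isIn (PySem.List.slice ls (some (-i)) none) lt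

def PredP (ls lt : List Char) (i : Int) : Bool :=
  PySem.Chars.isIn (PySem.List.slice ls none (some i)) lt

def InvS (ls lt : List Char) (probe k a w : Int) : Prop :=
  (w = 0 ∧ (∀ i, probe ≤ i → i < k → PredS ls lt i = true) ∧ a = if probe < k then k - 1 else 0) ∨
  (w = 1 ∧ SpecMax (PredS ls lt) probe ((ls.length : Int) - 1) a ∧
    ∃ i0, probe ≤ i0 ∧ i0 < k ∧ PredS ls lt i0 = false)

def InvP (ls lt : List Char) (probe k b z : Int) : Prop :=
  (z = 0 ∧ (∀ i, probe ≤ i → i < k → PredP ls lt i = true) ∧ b = if probe < k then k - 1 else 0) ∨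
  (z = 1 ∧ SpecMax (PredP ls lt) probe ((ls.length : Int) - 1) b ∧
    ∃ i0, probe ≤ i0 ∧ i0 < k ∧ PredP ls lt i0 = false)

theorem stepS (ls lt : List Char) (probe k a w : Int) (hp : 1 ≤ probe) (hk1 : probe ≤ k)
    (hkn : k < (ls.length : Int)) (h : InvS ls lt probe k a w) :
    InvS ls lt probe (k + 1) (if PredS ls lt k then k else a) (if PredS ls lt k then w else 1) := by
  by_cases hsk : PredS ls lt k = true
  · rw [if_pos hsk, if_pos hsk]
    rcases h with ⟨hw0, hall, ha⟩ | ⟨hw1, hspec, i0, hi01, hi02, hi0f⟩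
    · exact Or.inl ⟨hw0, fun i h1 h2 => by
        rcases lt_or_ge i k with h3 | h3
        · exact hall i h1 h3
        · have : i = k := by omega
          rwa [this], by simp [show probe < k + 1 by omega]⟩
    · exact absurd (monoS ls lt i0 k (by omega) (by omega) hsk) (by simp [PredS] at hi0f ⊢; exact hi0f)
  · rw [if_neg hsk, if_neg hsk]
    rcases h with ⟨hw0, hall, ha⟩ | ⟨hw1, hspec, i0, hi01, hi02, hi0f⟩
    · refine Or.inr ⟨rfl, ?_, k, hk1, by omega, by simpa using hsk⟩
      unfold SpecMax
      by_cases hpk : probe < k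
      · have hps : PredS ls lt probe = true := hall probe (le_refl _) hpk
        rw [if_neg (by simp [hps]; omega)]
        refine ⟨by omega, by omega, ?_, Or.inr ?_⟩
        · rw [ha, if_pos hpk]
          rcases eq_or_lt_of_le (show probe ≤ k - 1 by omega) with he | hlt
          · rw [← he]; exact hps
          · exact hall (k - 1) (by omega) (by omega)
        · rw [ha, if_pos hpk]
          simpa [sub_add_cancel] using hsk
      · have hpke : probe = k := by omega
        rw [if_pos (by rw [hpke]; simp [Bool.eq_false_iff.mpr hsk])]
        rw [ha, if_neg hpk]
    · exact Or.inr ⟨rfl, hspec, i0, hi01, by omega, hi0f⟩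

theorem stepP (ls lt : List Char) (probe k b z : Int) (hp : 1 ≤ probe) (hk1 : probe ≤ k)
    (hkn : k < (ls.length : Int)) (h : InvP ls lt probe k b z) :
    InvP ls lt probe (k + 1) (if PredP ls lt k then k else b) (if PredP ls lt k then z else 1) := by
  by_cases hsk : PredP ls lt k = true
  · rw [if_pos hsk, if_pos hsk]
    rcases h with ⟨hw0, hall, ha⟩ | ⟨hw1, hspec, i0, hi01, hi02, hi0f⟩
    · exact Or.inl ⟨hw0, fun i h1 h2 => by
        rcases lt_or_ge i k with h3 | h3
        · exact hall i h1 h3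
        · have : i = k := by omega
          rwa [this], by simp [show probe < k + 1 by omega]⟩
    · exact absurd (monoP ls lt i0 k (by omega) (by omega) hsk) (by simp [PredP] at hi0f ⊢; exact hi0f)
  · rw [if_neg hsk, if_neg hsk]
    rcases h with ⟨hw0, hall, ha⟩ | ⟨hw1, hspec, i0, hi01, hi02, hi0f⟩
    · refine Or.inr ⟨rfl, ?_, k, hk1, by omega, by simpa using hsk⟩
      unfold SpecMax
      by_cases hpk : probe < k
      · have hps : PredP ls lt probe = true := hall probe (le_refl _) hpk
        rw [if_neg (by simp [hps]; omega)]
        refine ⟨by omega, by omega, ?_, Or.inr ?_⟩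
        · rw [ha, if_pos hpk]
          rcases eq_or_lt_of_le (show probe ≤ k - 1 by omega) with he | hlt
          · rw [← he]; exact hps
          · exact hall (k - 1) (by omega) (by omega)
        · rw [ha, if_pos hpk]
          simpa [sub_add_cancel] using hsk
      · have hpke : probe = k := by omega
        rw [if_pos (by rw [hpke]; simp [Bool.eq_false_iff.mpr hsk])]
        rw [ha, if_neg hpk]
    · exact Or.inr ⟨rfl, hspec, i0, hi01, by omega, hi0f⟩

theorem finalS (ls lt : List Char) (probe a w : Int) (hp : 1 ≤ probe)
    (hk1 : probe ≤ (ls.length : Int)) (h : InvS ls lt probe (ls.length : Int) a w) :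
    SpecMax (PredS ls lt) probe ((ls.length : Int) - 1) a := by
  rcases h with ⟨hw0, hall, ha⟩ | ⟨hw1, hspec, _⟩
  · unfold SpecMax
    by_cases hpk : probe < (ls.length : Int)
    · have hps : PredS ls lt probe = true := hall probe (le_refl _) hpk
      rw [if_neg (by simp [hps]; omega)]
      rw [ha, if_pos hpk]
      refine ⟨by omega, by omega, ?_, Or.inl rfl⟩
      rcases eq_or_lt_of_le (show probe ≤ (ls.length : Int) - 1 by omega) with he | hlt
      · rw [← he]; exact hps
      · exact hall _ (by omega) (by omega)
    · rw [if_pos (Or.inl (by omega))]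
      rw [ha, if_neg hpk]
  · exact hspec

theorem finalP (ls lt : List Char) (probe b z : Int) (hp : 1 ≤ probe)
    (hk1 : probe ≤ (ls.length : Int)) (h : InvP ls lt probe (ls.length : Int) b z) :
    SpecMax (PredP ls lt) probe ((ls.length : Int) - 1) b := by
  rcases h with ⟨hw0, hall, ha⟩ | ⟨hw1, hspec, _⟩
  · unfold SpecMax
    by_cases hpk : probe < (ls.length : Int)
    · have hps : PredP ls lt probe = true := hall probe (le_refl _) hpk
      rw [if_neg (by simp [hps]; omega)]
      rw [ha, if_pos hpk]
      refine ⟨by omega, by omega, ?_, Or.inl rfl⟩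
      rcases eq_or_lt_of_le (show probe ≤ (ls.length : Int) - 1 by omega) with he | hlt
      · rw [← he]; exact hps
      · exact hall _ (by omega) (by omega)
    · rw [if_pos (Or.inl (by omega))]
      rw [ha, if_neg hpk]
  · exact hspec

theorem invS_w01 (ls lt : List Char) (probe k a w : Int) (h : InvS ls lt probe k a w) :
    w = 0 ∨ w = 1 := by
  rcases h with ⟨h, _⟩ | ⟨h, _⟩
  · exact Or.inl h
  · exact Or.inr h

theorem invP_z01 (ls lt : List Char) (probe k b z : Int) (h : InvP ls lt probe k b z) :
    z = 0 ∨ z = 1 := by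
  rcases h with ⟨h, _⟩ | ⟨h, _⟩
  · exact Or.inl h
  · exact Or.inr h

theorem invS_spec_of_one (ls lt : List Char) (probe k a : Int)
    (h : InvS ls lt probe k a 1) :
    SpecMax (PredS ls lt) probe ((ls.length : Int) - 1) a := by
  rcases h with ⟨h0, _⟩ | ⟨_, hs, _⟩
  · exact absurd h0 one_ne_zero
  · exact hs

theorem invP_spec_of_one (ls lt : List Char) (probe k b : Int)
    (h : InvP ls lt probe k b 1) :
    SpecMax (PredP ls lt) probe ((ls.length : Int) - 1) b := by
  rcases h with ⟨h0, _⟩ | ⟨_, hs, _⟩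
  · exact absurd h0 one_ne_zero
  · exact hs

theorem loopCons (ls lt : List Char) (i : Int) (rest : List Int) (a b w z : Int) :
    maxmatchLoop ls lt (i :: rest) (a, b, w, z) =
      if (if PredS ls lt i then w else 1) ≠ 0 ∧ (if PredP ls lt i then z else 1) ≠ 0 then
        ((if PredS ls lt i then i else a), (if PredP ls lt i then i else b),
         (if PredS ls lt i then w else 1), (if PredP ls lt i then z else 1))
      else maxmatchLoop ls lt rest
        ((if PredS ls lt i then i else a), (if PredP ls lt i then i else b),
         (if PredS ls lt i then w else 1), (if PredP ls lt i then z else 1)) := by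
  simp only [maxmatchLoop, PredS, PredP]
  by_cases h1 : PySem.Chars.isIn (PySem.List.slice ls (some (-i)) none) lt = true <;>
    by_cases h2 : PySem.Chars.isIn (PySem.List.slice ls none (some i)) lt = true <;>
      simp [h1, h2]

theorem loop_spec (ls lt : List Char) (probe : Int) (hp : 1 ≤ probe) :
    ∀ m : Nat, ∀ k a b w z : Int, ((ls.length : Int) - k).toNat = m →
    probe ≤ k → k ≤ (ls.length : Int) →
    InvS ls lt probe k a w → InvP ls lt probe k b z → ¬(w = 1 ∧ z = 1) →
    SpecMax (PredS ls lt) probe ((ls.length : Int) - 1)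
      (maxmatchLoop ls lt (PySem.List.pyRange k (ls.length : Int) 1) (a, b, w, z)).1 ∧
    SpecMax (PredP ls lt) probe ((ls.length : Int) - 1)
      (maxmatchLoop ls lt (PySem.List.pyRange k (ls.length : Int) 1) (a, b, w, z)).2.1 := by
  intro m
  induction m using Nat.strong_induction_on with
  | _ m IH =>
    intro k a b w z hmm hk1 hk2 hA hB hwz
    by_cases hkn : k < (ls.length : Int)
    · rw [PySem.List.pyRange_one_cons hkn, loopCons]
      have hstepA := stepS ls lt probe k a w hp hk1 hkn hA
      have hstepB := stepP ls lt probe k b z hp hk1 hkn hB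
      have hw01 := invS_w01 ls lt probe (k + 1) _ _ hstepA
      have hz01 := invP_z01 ls lt probe (k + 1) _ _ hstepB
      by_cases hbr : (if PredS ls lt k then w else 1) ≠ 0 ∧ (if PredP ls lt k then z else 1) ≠ 0
      · rw [if_pos hbr]
        have hw1 : (if PredS ls lt k then w else 1) = 1 := by
          rcases hw01 with h | h
          · exact absurd h hbr.1
          · exact h
        have hz1 : (if PredP ls lt k then z else 1) = 1 := by
          rcases hz01 with h | h
          · exact absurd h hbr.2
          · exact h
        rw [hw1] at hstepA
        rw [hz1] at hstepB
        exact ⟨invS_spec_of_one ls lt probe (k + 1) _ hstepA,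
               invP_spec_of_one ls lt probe (k + 1) _ hstepB⟩
      · rw [if_neg hbr]
        refine IH ((ls.length : Int) - (k + 1)).toNat (by omega) (k + 1) _ _ _ _ rfl
          (by omega) (by omega) hstepA hstepB ?_
        intro hc
        exact hbr ⟨by rw [hc.1]; exact one_ne_zero, by rw [hc.2]; exact one_ne_zero⟩
    · have hke : k = (ls.length : Int) := by omega
      subst hke
      rw [PySem.List.pyRange_one_eq_nil (le_refl _)]
      exact ⟨finalS ls lt probe a w hp hk1 hA, finalP ls lt probe b z hp hk1 hB⟩

-- ===== VERDICT (by name: the statement is the Claim_ definition above) =====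
theorem maxmatch_spec : Claim_equal_maxmatch := by
  unfold Claim_equal_maxmatch
  intro sample target probe _ hpre
  unfold Pre_maxmatch at hpre
  unfold Spec_maxmatch
  simp only [maxmatch, maxmatch_alt, PySem.List.len_eq]
  set ls := sample.toList with hls
  set lt := target.toList with hlt
  by_cases hpn : probe ≤ (ls.length : Int)
  · -- the loop runs (possibly zero iterations with probe = length)
    have hinvS : InvS ls lt probe probe 0 0 :=
      Or.inl ⟨rfl, fun i h1 h2 => absurd h1 (by omega), by simp⟩
    have hinvP : InvP ls lt probe probe 0 0 :=
      Or.inl ⟨rfl, fun i h1 h2 => absurd h1 (by omega), by simp⟩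
    have hloop := loop_spec ls lt probe hpre ((ls.length : Int) - probe).toNat probe 0 0 0 0 rfl
      (le_refl _) hpn hinvS hinvP (by simp)
    have hmonoS : MonoOn (PredS ls lt) probe ((ls.length : Int) - 1) :=
      fun i j h1 h2 h3 hj => monoS ls lt i j (by omega) h2 hj
    have hmonoP : MonoOn (PredP ls lt) probe ((ls.length : Int) - 1) :=
      fun i j h1 h2 h3 hj => monoP ls lt i j (by omega) h2 hj
    have hcongr : ∀ i, probe ≤ i → i ≤ (ls.length : Int) - 1 →
        PredS ls lt i = (fun i => PySem.Chars.isIn (PySem.List.slice ls (some ((ls.length : Int) - i)) none) lt) i := by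
      intro i h1 h2
      unfold PredS
      simp only [slice_sub_eq_neg ls i (by omega) (by omega)]
    have hBmonoS : MonoOn (fun i => PySem.Chars.isIn (PySem.List.slice ls (some ((ls.length : Int) - i)) none) lt) probe ((ls.length : Int) - 1) :=
      monoOn_congr (PredS ls lt) _ probe ((ls.length : Int) - 1) hcongr hmonoS
    have hBa : SpecMax (PredS ls lt) probe ((ls.length : Int) - 1)
        (bestMax (fun i => PySem.Chars.isIn (PySem.List.slice ls (some ((ls.length : Int) - i)) none) lt) probe ((ls.length : Int) - 1)) :=
      specMax_congr _ (PredS ls lt) probe ((ls.length : Int) - 1) _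
        (fun i h1 h2 => (hcongr i h1 h2).symm)
        (bestMax_spec _ probe ((ls.length : Int) - 1) hBmonoS)
    have hBb : SpecMax (PredP ls lt) probe ((ls.length : Int) - 1)
        (bestMax (fun i => PySem.Chars.isIn (PySem.List.slice ls none (some i)) lt) probe ((ls.length : Int) - 1)) :=
      bestMax_spec (PredP ls lt) probe ((ls.length : Int) - 1) hmonoP
    have haeq := specMax_unique (PredS ls lt) probe ((ls.length : Int) - 1) _ _ hmonoS hloop.1 hBa
    have hbeq := specMax_unique (PredP ls lt) probe ((ls.length : Int) - 1) _ _ hmonoP hloop.2 hBb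
    rw [← haeq, ← hbeq]
    have hx : (if (maxmatchLoop ls lt (PySem.List.pyRange probe (ls.length : Int) 1) (0, 0, 0, 0)).1 ≠ 0 then
          PySem.Chars.find lt (PySem.List.slice ls (some (-(maxmatchLoop ls lt (PySem.List.pyRange probe (ls.length : Int) 1) (0, 0, 0, 0)).1)) none) else 0) =
        (if (maxmatchLoop ls lt (PySem.List.pyRange probe (ls.length : Int) 1) (0, 0, 0, 0)).1 ≠ 0 then
          PySem.Chars.find lt (PySem.List.slice ls (some ((ls.length : Int) - (maxmatchLoop ls lt (PySem.List.pyRange probe (ls.length : Int) 1) (0, 0, 0, 0)).1)) none) else 0) := by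
      set aA := (maxmatchLoop ls lt (PySem.List.pyRange probe (ls.length : Int) 1) (0, 0, 0, 0)).1 with haA
      by_cases ha0 : aA = 0
      · rw [if_neg (by simp [ha0]), if_neg (by simp [ha0])]
      · rw [if_pos ha0, if_pos ha0]
        have hsp := hloop.1
        unfold SpecMax at hsp
        split_ifs at hsp with hc
        · exact absurd hsp ha0
        · obtain ⟨h1, h2, _, _⟩ := hsp
          rw [slice_sub_eq_neg ls aA (by omega) (by omega)]
    rw [hx]
  · -- probe > len(sample): the range is empty and both sides return [0, 0, 0, 0]
    rw [PySem.List.pyRange_one_eq_nil (by omega)]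
    have hb : ∀ P : Int → Bool, bestMax P probe ((ls.length : Int) - 1) = 0 := by
      intro P
      unfold bestMax
      rw [if_pos (Or.inl (by omega))]
    rw [hb, hb]
    simp [maxmatchLoop]
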